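-- pv_equiv track=rewrite | github.com/sanjaybasu/medicaid_rfp_analysis | scripts/phase2_document_analysis.py | calculate_code_frequencies
-- ===== SOURCE A (Python) =====
-- from typing import Dict, List, Optional
--
-- DOMAIN_CODES = {
--     'VBC': 'Value-Based Care',
--     'PH': 'Population Health',
--     'AC': 'Access to Care',
--     'CC': 'Care Coordination',
--     'QM': 'Quality Metrics',
--     'PM': 'Payment Models',
--     'HIT': 'Health Information Technology',
--     'WD': 'Workforce Development'
-- }
--
-- CLAIM_TYPE_CODES = {
--     'HIST': 'Historical Performance',
--     'PROJ': 'Projected Performance',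
--     'COMP': 'Comparative Performance',
--     'METH': 'Methodology Description'
-- }
--
-- EVIDENCE_TYPE_CODES = {
--     'PR': 'Peer-Reviewed',
--     'CG': 'Control Group',
--     'PP': 'Pre-Post',
--     'INT': 'Internal Analysis',
--     'EXT': 'External Validation',
--     'NONE': 'No Evidence'
-- }
--
-- CLINICAL_AREA_CODES = {
--     'MAT': 'Maternity',
--     'PED': 'Pediatrics',
--     'BH': 'Behavioral Health',
--     'CHR': 'Chronic Disease',
--     'PCP': 'Primary Care',
--     'HOSP': 'Hospital Utilization',
--     'RX': 'Pharmacy'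
-- }
--
-- QUANTIFICATION_CODES = {
--     'Q-ABS': 'Absolute Number',
--     'Q-PCT': 'Percentage',
--     'Q-PPT': 'Percentage Points',
--     'Q-TGT': 'Target with Timeline',
--     'Q-NONE': 'Unquantified'
-- }
--
-- def calculate_code_frequencies(claims: List[Dict]) -> Dict:
--     """Calculate frequency of each code type."""
--     frequencies = {
--         'domain_counts': {code: 0 for code in DOMAIN_CODES},
--         'clinical_area_counts': {code: 0 for code in CLINICAL_AREA_CODES},
--         'evidence_type_counts': {code: 0 for code in EVIDENCE_TYPE_CODES},
--         'claim_type_counts': {code: 0 for code in CLAIM_TYPE_CODES},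
--         'quantification_counts': {code: 0 for code in QUANTIFICATION_CODES},
--     }
--
--     for claim in claims:
--         domain = claim.get('domain_code')
--         if domain in frequencies['domain_counts']:
--             frequencies['domain_counts'][domain] += 1
--
--         clinical = claim.get('clinical_area')
--         if clinical in frequencies['clinical_area_counts']:
--             frequencies['clinical_area_counts'][clinical] += 1
--
--         evidence = claim.get('evidence_type')
--         if evidence in frequencies['evidence_type_counts']:
--             frequencies['evidence_type_counts'][evidence] += 1
--
--         claim_type = claim.get('claim_type')
--         if claim_type in frequencies['claim_type_counts']:
--             frequencies['claim_type_counts'][claim_type] += 1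
--
--         quant = claim.get('change_type')
--         if quant in frequencies['quantification_counts']:
--             frequencies['quantification_counts'][quant] += 1
--
--     return frequencies
-- ===== SOURCE B (Python) =====
-- DOMAIN_CODES = {
--     'VBC': 'Value-Based Care',
--     'PH': 'Population Health',
--     'AC': 'Access to Care',
--     'CC': 'Care Coordination',
--     'QM': 'Quality Metrics',
--     'PM': 'Payment Models',
--     'HIT': 'Health Information Technology',
--     'WD': 'Workforce Development'
-- }
--
-- CLAIM_TYPE_CODES = {
--     'HIST': 'Historical Performance',
--     'PROJ': 'Projected Performance',
--     'COMP': 'Comparative Performance',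
--     'METH': 'Methodology Description'
-- }
--
-- EVIDENCE_TYPE_CODES = {
--     'PR': 'Peer-Reviewed',
--     'CG': 'Control Group',
--     'PP': 'Pre-Post',
--     'INT': 'Internal Analysis',
--     'EXT': 'External Validation',
--     'NONE': 'No Evidence'
-- }
--
-- CLINICAL_AREA_CODES = {
--     'MAT': 'Maternity',
--     'PED': 'Pediatrics',
--     'BH': 'Behavioral Health',
--     'CHR': 'Chronic Disease',
--     'PCP': 'Primary Care',
--     'HOSP': 'Hospital Utilization',
--     'RX': 'Pharmacy'
-- }
--
-- QUANTIFICATION_CODES = {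
--     'Q-ABS': 'Absolute Number',
--     'Q-PCT': 'Percentage',
--     'Q-PPT': 'Percentage Points',
--     'Q-TGT': 'Target with Timeline',
--     'Q-NONE': 'Unquantified'
-- }
--
--
-- def calculate_code_frequencies(claims):
--     """Calculate frequency of each code type."""
--     def tally(field, codes):
--         # full frequency table of raw field values, then projected onto the known codes
--         counts = {}
--         for claim in claims:
--             v = claim.get(field)
--             counts[v] = counts.get(v, 0) + 1
--         return {code: counts.get(code, 0) for code in codes}
--
--     return {
--         'domain_counts': tally('domain_code', DOMAIN_CODES),
--         'clinical_area_counts': tally('clinical_area', CLINICAL_AREA_CODES),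
--         'evidence_type_counts': tally('evidence_type', EVIDENCE_TYPE_CODES),
--         'claim_type_counts': tally('claim_type', CLAIM_TYPE_CODES),
--         'quantification_counts': tally('change_type', QUANTIFICATION_CODES),
--     }
-- ===== Notes on version B (the rewrite author's own statement) =====
-- stated objective: idiomatic
-- what changed: B replaces A's single pass with five inline membership tests against the pre-zeroed result dicts by a per-category build-then-project: for each category it builds a full frequency table of the raw field values and then projects it onto the known codes with zero-fill, assembling the same five-key result.
import Mathlib
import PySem

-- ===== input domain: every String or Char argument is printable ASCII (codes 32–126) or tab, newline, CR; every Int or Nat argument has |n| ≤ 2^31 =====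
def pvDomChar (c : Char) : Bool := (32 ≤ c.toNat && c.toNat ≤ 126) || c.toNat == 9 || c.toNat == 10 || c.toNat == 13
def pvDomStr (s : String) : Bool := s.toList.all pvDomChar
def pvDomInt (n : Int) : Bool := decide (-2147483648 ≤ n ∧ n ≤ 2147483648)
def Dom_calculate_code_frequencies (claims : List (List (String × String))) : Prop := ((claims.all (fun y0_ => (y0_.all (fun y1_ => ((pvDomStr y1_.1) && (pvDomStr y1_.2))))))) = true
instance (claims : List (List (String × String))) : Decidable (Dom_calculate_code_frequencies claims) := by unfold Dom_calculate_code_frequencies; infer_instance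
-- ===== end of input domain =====

-- B rebuilds each category as a full frequency table of the raw field values, projected onto
-- the known codes (idiomatic build-then-project), instead of A's single pass with five inline
-- membership tests; same return value, A's mutation of nothing observable.

-- ===== PORT A =====
-- module constants (the description strings are carried along but never used by the function)
def DOMAIN_CODES : PySem.Dict String String := PySem.Dict.mk
  [("VBC", "Value-Based Care"), ("PH", "Population Health"), ("AC", "Access to Care"),
   ("CC", "Care Coordination"), ("QM", "Quality Metrics"), ("PM", "Payment Models"),
   ("HIT", "Health Information Technology"), ("WD", "Workforce Development")]

def CLAIM_TYPE_CODES : PySem.Dict String String := PySem.Dict.mk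
  [("HIST", "Historical Performance"), ("PROJ", "Projected Performance"),
   ("COMP", "Comparative Performance"), ("METH", "Methodology Description")]

def EVIDENCE_TYPE_CODES : PySem.Dict String String := PySem.Dict.mk
  [("PR", "Peer-Reviewed"), ("CG", "Control Group"), ("PP", "Pre-Post"),
   ("INT", "Internal Analysis"), ("EXT", "External Validation"), ("NONE", "No Evidence")]

def CLINICAL_AREA_CODES : PySem.Dict String String := PySem.Dict.mk
  [("MAT", "Maternity"), ("PED", "Pediatrics"), ("BH", "Behavioral Health"),
   ("CHR", "Chronic Disease"), ("PCP", "Primary Care"), ("HOSP", "Hospital Utilization"),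
   ("RX", "Pharmacy")]

def QUANTIFICATION_CODES : PySem.Dict String String := PySem.Dict.mk
  [("Q-ABS", "Absolute Number"), ("Q-PCT", "Percentage"), ("Q-PPT", "Percentage Points"),
   ("Q-TGT", "Target with Timeline"), ("Q-NONE", "Unquantified")]

-- the three-line per-category block (`x = claim.get(f); if x in frequencies[cat]:
-- frequencies[cat][x] += 1`), written out identically five times in the Python, factored once
def aBump (freq : PySem.Dict String (PySem.Dict String Int)) (cat : String)
    (v : Option String) : PySem.Dict String (PySem.Dict String Int) :=
  match v with
  | some s =>
      if (freq.getD cat PySem.Dict.empty).contains s then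
        freq.insert cat ((freq.getD cat PySem.Dict.empty).modify s 0 (· + 1))
      else freq
  | none => freq

-- the body of `for claim in claims`
def aStep (freq : PySem.Dict String (PySem.Dict String Int)) (claim : List (String × String)) :
    PySem.Dict String (PySem.Dict String Int) :=
  let claimD := PySem.Dict.mk claim
  let freq := aBump freq "domain_counts" (claimD.get? "domain_code")
  let freq := aBump freq "clinical_area_counts" (claimD.get? "clinical_area")
  let freq := aBump freq "evidence_type_counts" (claimD.get? "evidence_type")
  let freq := aBump freq "claim_type_counts" (claimD.get? "claim_type")
  aBump freq "quantification_counts" (claimD.get? "change_type")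

def calculate_code_frequencies (claims : List (List (String × String))) :
    List (String × List (String × Int)) :=
  let frequencies : PySem.Dict String (PySem.Dict String Int) := PySem.Dict.mk
    [("domain_counts", PySem.Dict.ofList (DOMAIN_CODES.keys.map (fun code => (code, (0 : Int))))),
     ("clinical_area_counts", PySem.Dict.ofList (CLINICAL_AREA_CODES.keys.map (fun code => (code, (0 : Int))))),
     ("evidence_type_counts", PySem.Dict.ofList (EVIDENCE_TYPE_CODES.keys.map (fun code => (code, (0 : Int))))),
     ("claim_type_counts", PySem.Dict.ofList (CLAIM_TYPE_CODES.keys.map (fun code => (code, (0 : Int))))),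
     ("quantification_counts", PySem.Dict.ofList (QUANTIFICATION_CODES.keys.map (fun code => (code, (0 : Int)))))]
  let final := claims.foldl aStep frequencies
  final.items.map (fun p => (p.1, p.2.items))

-- ===== PORT B =====
-- full frequency table of the raw field values (counts[v] = counts.get(v, 0) + 1), then
-- projected onto the known codes
def bTally (claims : List (List (String × String))) (field : String) (codes : List String) :
    List (String × Int) :=
  let counts : PySem.Dict (Option String) Int :=
    claims.foldl (fun d claim => d.modify ((PySem.Dict.mk claim).get? field) 0 (· + 1))
      PySem.Dict.empty
  codes.map (fun code => (code, counts.getD (some code) 0))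

def calculate_code_frequencies_alt (claims : List (List (String × String))) :
    List (String × List (String × Int)) :=
  [("domain_counts", bTally claims "domain_code" DOMAIN_CODES.keys),
   ("clinical_area_counts", bTally claims "clinical_area" CLINICAL_AREA_CODES.keys),
   ("evidence_type_counts", bTally claims "evidence_type" EVIDENCE_TYPE_CODES.keys),
   ("claim_type_counts", bTally claims "claim_type" CLAIM_TYPE_CODES.keys),
   ("quantification_counts", bTally claims "change_type" QUANTIFICATION_CODES.keys)]

-- ===== PRECONDITION & SPEC =====
def Spec_calculate_code_frequencies (claims : List (List (String × String))) (out : List (String × List (String × Int))) : Prop := out = calculate_code_frequencies_alt claims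
instance (claims : List (List (String × String))) (out : List (String × List (String × Int))) : Decidable (Spec_calculate_code_frequencies claims out) := by unfold Spec_calculate_code_frequencies; infer_instance

-- ===== CLAIM (what is proved, stated in full; the proofs are below) =====
def Claim_equal_calculate_code_frequencies : Prop := ∀ (claims : List (List (String × String))), Dom_calculate_code_frequencies claims → Spec_calculate_code_frequencies claims (calculate_code_frequencies claims)

-- ===== LEMMAS AND PROOFS =====

-- a code table: each known code paired with its current count
def mkTab (codes : List String) (g : String → Int) : PySem.Dict String Int :=
  PySem.Dict.mk (codes.map (fun k => (k, g k)))

-- A's outer dict always has exactly these five keys in this order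
def Outer5 (d1 d2 d3 d4 d5 : PySem.Dict String Int) :
    PySem.Dict String (PySem.Dict String Int) :=
  PySem.Dict.mk
    [("domain_counts", d1), ("clinical_area_counts", d2), ("evidence_type_counts", d3),
     ("claim_type_counts", d4), ("quantification_counts", d5)]

-- inner effect of one aBump on the selected category
def iApply (d : PySem.Dict String Int) (v : Option String) : PySem.Dict String Int :=
  match v with
  | some s => if d.contains s then d.modify s 0 (· + 1) else d
  | none => d

lemma mkTab_congr (codes : List String) (g g' : String → Int)
    (h : ∀ k ∈ codes, g k = g' k) : mkTab codes g = mkTab codes g' := by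
  unfold mkTab
  exact congrArg PySem.Dict.mk (List.map_congr_left (fun k hk => by rw [h k hk]))


lemma getD_outer1 (d1 d2 d3 d4 d5 : PySem.Dict String Int) :
    (Outer5 d1 d2 d3 d4 d5).getD "domain_counts" PySem.Dict.empty = d1 := by
  simp [Outer5, PySem.Dict.getD_eq_get?_getD, PySem.Dict.get?_mk_cons]

lemma getD_outer2 (d1 d2 d3 d4 d5 : PySem.Dict String Int) :
    (Outer5 d1 d2 d3 d4 d5).getD "clinical_area_counts" PySem.Dict.empty = d2 := by
  simp [Outer5, PySem.Dict.getD_eq_get?_getD, PySem.Dict.get?_mk_cons]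

lemma getD_outer3 (d1 d2 d3 d4 d5 : PySem.Dict String Int) :
    (Outer5 d1 d2 d3 d4 d5).getD "evidence_type_counts" PySem.Dict.empty = d3 := by
  simp [Outer5, PySem.Dict.getD_eq_get?_getD, PySem.Dict.get?_mk_cons]

lemma getD_outer4 (d1 d2 d3 d4 d5 : PySem.Dict String Int) :
    (Outer5 d1 d2 d3 d4 d5).getD "claim_type_counts" PySem.Dict.empty = d4 := by
  simp [Outer5, PySem.Dict.getD_eq_get?_getD, PySem.Dict.get?_mk_cons]

lemma getD_outer5 (d1 d2 d3 d4 d5 : PySem.Dict String Int) :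
    (Outer5 d1 d2 d3 d4 d5).getD "quantification_counts" PySem.Dict.empty = d5 := by
  simp [Outer5, PySem.Dict.getD_eq_get?_getD, PySem.Dict.get?_mk_cons]

lemma insert_outer1 (d1 d2 d3 d4 d5 x : PySem.Dict String Int) :
    (Outer5 d1 d2 d3 d4 d5).insert "domain_counts" x = Outer5 x d2 d3 d4 d5 := by
  simp [Outer5, PySem.Dict.insert, PySem.Dict.contains]

lemma insert_outer2 (d1 d2 d3 d4 d5 x : PySem.Dict String Int) :
    (Outer5 d1 d2 d3 d4 d5).insert "clinical_area_counts" x = Outer5 d1 x d3 d4 d5 := by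
  simp [Outer5, PySem.Dict.insert, PySem.Dict.contains]

lemma insert_outer3 (d1 d2 d3 d4 d5 x : PySem.Dict String Int) :
    (Outer5 d1 d2 d3 d4 d5).insert "evidence_type_counts" x = Outer5 d1 d2 x d4 d5 := by
  simp [Outer5, PySem.Dict.insert, PySem.Dict.contains]

lemma insert_outer4 (d1 d2 d3 d4 d5 x : PySem.Dict String Int) :
    (Outer5 d1 d2 d3 d4 d5).insert "claim_type_counts" x = Outer5 d1 d2 d3 x d5 := by
  simp [Outer5, PySem.Dict.insert, PySem.Dict.contains]

lemma insert_outer5 (d1 d2 d3 d4 d5 x : PySem.Dict String Int) :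
    (Outer5 d1 d2 d3 d4 d5).insert "quantification_counts" x = Outer5 d1 d2 d3 d4 x := by
  simp [Outer5, PySem.Dict.insert, PySem.Dict.contains]

lemma bump_outer1 (d1 d2 d3 d4 d5 : PySem.Dict String Int) (v : Option String) :
    aBump (Outer5 d1 d2 d3 d4 d5) "domain_counts" v = Outer5 (iApply d1 v) d2 d3 d4 d5 := by
  cases v with
  | none => rfl
  | some s =>
      simp only [aBump]
      rw [getD_outer1]
      by_cases h : d1.contains s = true
      · rw [if_pos h, insert_outer1]
        simp [iApply, h]
      · rw [if_neg h]
        simp [iApply, h]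

lemma bump_outer2 (d1 d2 d3 d4 d5 : PySem.Dict String Int) (v : Option String) :
    aBump (Outer5 d1 d2 d3 d4 d5) "clinical_area_counts" v = Outer5 d1 (iApply d2 v) d3 d4 d5 := by
  cases v with
  | none => rfl
  | some s =>
      simp only [aBump]
      rw [getD_outer2]
      by_cases h : d2.contains s = true
      · rw [if_pos h, insert_outer2]
        simp [iApply, h]
      · rw [if_neg h]
        simp [iApply, h]

lemma bump_outer3 (d1 d2 d3 d4 d5 : PySem.Dict String Int) (v : Option String) :
    aBump (Outer5 d1 d2 d3 d4 d5) "evidence_type_counts" v = Outer5 d1 d2 (iApply d3 v) d4 d5 := by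
  cases v with
  | none => rfl
  | some s =>
      simp only [aBump]
      rw [getD_outer3]
      by_cases h : d3.contains s = true
      · rw [if_pos h, insert_outer3]
        simp [iApply, h]
      · rw [if_neg h]
        simp [iApply, h]

lemma bump_outer4 (d1 d2 d3 d4 d5 : PySem.Dict String Int) (v : Option String) :
    aBump (Outer5 d1 d2 d3 d4 d5) "claim_type_counts" v = Outer5 d1 d2 d3 (iApply d4 v) d5 := by
  cases v with
  | none => rfl
  | some s =>
      simp only [aBump]
      rw [getD_outer4]
      by_cases h : d4.contains s = true
      · rw [if_pos h, insert_outer4]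
        simp [iApply, h]
      · rw [if_neg h]
        simp [iApply, h]

lemma bump_outer5 (d1 d2 d3 d4 d5 : PySem.Dict String Int) (v : Option String) :
    aBump (Outer5 d1 d2 d3 d4 d5) "quantification_counts" v = Outer5 d1 d2 d3 d4 (iApply d5 v) := by
  cases v with
  | none => rfl
  | some s =>
      simp only [aBump]
      rw [getD_outer5]
      by_cases h : d5.contains s = true
      · rw [if_pos h, insert_outer5]
        simp [iApply, h]
      · rw [if_neg h]
        simp [iApply, h]

lemma aStep_outer (d1 d2 d3 d4 d5 : PySem.Dict String Int) (c : List (String × String)) :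
    aStep (Outer5 d1 d2 d3 d4 d5) c =
      Outer5 (iApply d1 ((PySem.Dict.mk c).get? "domain_code"))
             (iApply d2 ((PySem.Dict.mk c).get? "clinical_area"))
             (iApply d3 ((PySem.Dict.mk c).get? "evidence_type"))
             (iApply d4 ((PySem.Dict.mk c).get? "claim_type"))
             (iApply d5 ((PySem.Dict.mk c).get? "change_type")) := by
  simp only [aStep, bump_outer1, bump_outer2, bump_outer3, bump_outer4, bump_outer5]

lemma fold_outer (claims : List (List (String × String)))
    (d1 d2 d3 d4 d5 : PySem.Dict String Int) :
    claims.foldl aStep (Outer5 d1 d2 d3 d4 d5) =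
      Outer5 (claims.foldl (fun d c => iApply d ((PySem.Dict.mk c).get? "domain_code")) d1)
             (claims.foldl (fun d c => iApply d ((PySem.Dict.mk c).get? "clinical_area")) d2)
             (claims.foldl (fun d c => iApply d ((PySem.Dict.mk c).get? "evidence_type")) d3)
             (claims.foldl (fun d c => iApply d ((PySem.Dict.mk c).get? "claim_type")) d4)
             (claims.foldl (fun d c => iApply d ((PySem.Dict.mk c).get? "change_type")) d5) := by
  induction claims generalizing d1 d2 d3 d4 d5 with
  | nil => rfl
  | cons c cs ih => simp only [List.foldl_cons, aStep_outer, ih]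

lemma find?_tab (codes : List String) (g : String → Int) (s : String) (hs : s ∈ codes) :
    List.find? (fun p => p.1 == s) (codes.map (fun k => (k, g k))) = some (s, g s) := by
  induction codes with
  | nil => cases hs
  | cons a as ih =>
      by_cases ha : a = s
      · subst ha
        rw [List.map_cons, List.find?_cons_of_pos (by simp)]
      · rw [List.map_cons, List.find?_cons_of_neg (by simp [ha])]
        rcases List.mem_cons.mp hs with h | h
        · exact absurd h.symm ha
        · exact ih h

lemma contains_tab_pos (codes : List String) (g : String → Int) (s : String) (hs : s ∈ codes) :
    (mkTab codes g).contains s = true := by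
  simp [mkTab, PySem.Dict.contains, List.any_map, Function.comp]
  exact hs

lemma contains_tab_neg (codes : List String) (g : String → Int) (s : String) (hs : s ∉ codes) :
    (mkTab codes g).contains s = false := by
  simp [mkTab, PySem.Dict.contains, List.any_map, Function.comp]
  intro x hx h
  exact hs (h ▸ hx)

lemma iApply_tab (codes : List String) (g : String → Int) (v : Option String) :
    iApply (mkTab codes g) v =
      mkTab codes (fun k => g k + if v = some k then 1 else 0) := by
  cases v with
  | none =>
      simp only [iApply]
      exact mkTab_congr _ _ _ (fun k _ => by simp)
  | some s =>
      simp only [iApply]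
      by_cases hs : s ∈ codes
      · have hc := contains_tab_pos codes g s hs
        have hget : (mkTab codes g).getD s 0 = g s := by
          simp only [mkTab, PySem.Dict.getD, PySem.Dict.get?]
          rw [find?_tab codes g s hs]
          rfl
        rw [hc]
        simp only [if_true, PySem.Dict.modify, hget]
        rw [PySem.Dict.insert, if_pos hc]
        rw [show (mkTab codes g).items = codes.map (fun k => (k, g k)) from rfl, List.map_map]
        simp only [mkTab]
        refine congrArg PySem.Dict.mk ?_
        refine List.map_congr_left (fun k _ => ?_)
        by_cases hks : k = s
        · subst hks; simp [Function.comp]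
        · simp [Function.comp, hks, Ne.symm hks]
      · have hc := contains_tab_neg codes g s hs
        rw [hc]
        simp only [Bool.false_eq_true, if_false]
        refine mkTab_congr _ _ _ (fun k hk => ?_)
        have hne : s ≠ k := fun h => hs (h ▸ hk)
        simp [hne]

lemma fold_inner (field : String) (codes : List String)
    (claims : List (List (String × String))) (g : String → Int) :
    claims.foldl (fun d c => iApply d ((PySem.Dict.mk c).get? field)) (mkTab codes g) =
      mkTab codes (fun k =>
        g k + ((claims.map (fun c => (PySem.Dict.mk c).get? field)).count (some k) : Int)) := by
  induction claims generalizing g with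
  | nil => exact (mkTab_congr _ _ _ (fun k _ => by simp)).symm
  | cons c cs ih =>
      simp only [List.foldl_cons, iApply_tab, ih]
      refine mkTab_congr _ _ _ (fun k _ => ?_)
      rw [List.map_cons, List.count_cons]
      by_cases h : (PySem.Dict.mk c).get? field = some k
      · simp [h]; ring
      · simp [h]

lemma bTally_eq (claims : List (List (String × String))) (field : String)
    (codes : List String) :
    bTally claims field codes = codes.map (fun k =>
      (k, ((claims.map (fun c => (PySem.Dict.mk c).get? field)).count (some k) : Int))) := by
  unfold bTally
  refine List.map_congr_left (fun k _ => ?_)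
  rw [← List.foldl_map (f := fun c => (PySem.Dict.mk c).get? field)
      (g := fun (d : PySem.Dict (Option String) Int) x => d.modify x 0 (· + 1))]
  rw [PySem.Dict.getD_foldl_modify_add_one]
  simp

-- ===== VERDICT (by name: the statement is the Claim_ definition above) =====
theorem calculate_code_frequencies_spec : Claim_equal_calculate_code_frequencies := by
  intro claims _
  unfold Spec_calculate_code_frequencies
  simp only [calculate_code_frequencies]
  have hinit : PySem.Dict.mk
      [("domain_counts", PySem.Dict.ofList (DOMAIN_CODES.keys.map (fun code => (code, (0 : Int))))),
       ("clinical_area_counts", PySem.Dict.ofList (CLINICAL_AREA_CODES.keys.map (fun code => (code, (0 : Int))))),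
       ("evidence_type_counts", PySem.Dict.ofList (EVIDENCE_TYPE_CODES.keys.map (fun code => (code, (0 : Int))))),
       ("claim_type_counts", PySem.Dict.ofList (CLAIM_TYPE_CODES.keys.map (fun code => (code, (0 : Int))))),
       ("quantification_counts", PySem.Dict.ofList (QUANTIFICATION_CODES.keys.map (fun code => (code, (0 : Int)))))] =
      Outer5 (mkTab DOMAIN_CODES.keys (fun _ => 0))
             (mkTab CLINICAL_AREA_CODES.keys (fun _ => 0))
             (mkTab EVIDENCE_TYPE_CODES.keys (fun _ => 0))
             (mkTab CLAIM_TYPE_CODES.keys (fun _ => 0))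
             (mkTab QUANTIFICATION_CODES.keys (fun _ => 0)) := by decide
  rw [hinit, fold_outer, fold_inner, fold_inner, fold_inner, fold_inner, fold_inner]
  unfold calculate_code_frequencies_alt
  rw [bTally_eq, bTally_eq, bTally_eq, bTally_eq, bTally_eq]
  simp [Outer5, mkTab]
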